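-- pv_equiv track=rewrite | github.com/lbanasze/dst | recipes/recipes.py | parse_recipe_ingredients
-- ===== SOURCE A (Python) =====
-- def parse_recipe_ingredients(ingredients: dict):
--     food_groups = ['MEAT', 'FISH_MEAT', 'EGG', 'FRUIT', 'VEGETABLE', 'SWEETENER', 'MONSTER', 'DAIRY']
--
--     food_group_ingredients = {}
--     special_ingredients = {}
--
--     for ingredient, quantity in ingredients.items():
--         ingredient_key = ingredient.upper()
--         if ingredient_key in food_groups:
--             if ingredient_key in food_group_ingredients:
--                 food_group_ingredients[ingredient_key] = food_group_ingredients[ingredient_key] + quantity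
--             else:
--                 food_group_ingredients[ingredient_key] = quantity
--         else:
--             if ingredient_key in special_ingredients:
--                 special_ingredients[ingredient_key] = special_ingredients[ingredient_key] + quantity
--             else:
--                 special_ingredients[ingredient_key] = quantity
--
--
--     return food_group_ingredients, special_ingredients
-- ===== SOURCE B (Python) =====
-- def parse_recipe_ingredients(ingredients: dict):
--     food_groups = {'MEAT', 'FISH_MEAT', 'EGG', 'FRUIT', 'VEGETABLE',
--                    'SWEETENER', 'MONSTER', 'DAIRY'}
--
--     # Phase 1: one aggregation pass over everything.
--     totals = {}
--     for ingredient, quantity in ingredients.items():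
--         key = ingredient.upper()
--         totals[key] = totals.get(key, 0) + quantity
--
--     # Phase 2: partition the aggregated totals.
--     food_group_ingredients = {k: v for k, v in totals.items() if k in food_groups}
--     special_ingredients = {k: v for k, v in totals.items() if k not in food_groups}
--
--     return food_group_ingredients, special_ingredients
-- ===== Notes on version B (the rewrite author's own statement) =====
-- stated objective: simpler
-- what changed: B replaces A's interleaved membership-test-and-accumulate loop over two dicts by a two-phase decomposition: one aggregation pass into a single totals dict, then two dict comprehensions partitioning totals by food-group membership.
import Mathlib
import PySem

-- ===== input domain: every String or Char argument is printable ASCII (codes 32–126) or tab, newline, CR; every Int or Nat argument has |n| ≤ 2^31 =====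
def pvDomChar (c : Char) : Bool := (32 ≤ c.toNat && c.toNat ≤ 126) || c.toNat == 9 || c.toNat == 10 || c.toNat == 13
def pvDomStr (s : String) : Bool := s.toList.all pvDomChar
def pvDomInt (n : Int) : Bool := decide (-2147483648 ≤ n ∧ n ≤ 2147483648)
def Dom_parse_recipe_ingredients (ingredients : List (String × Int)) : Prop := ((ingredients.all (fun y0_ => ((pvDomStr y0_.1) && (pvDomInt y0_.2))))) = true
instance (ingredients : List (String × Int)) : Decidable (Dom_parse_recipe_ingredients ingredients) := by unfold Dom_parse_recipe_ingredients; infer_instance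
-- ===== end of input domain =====

-- B replaces A's interleaved classify-and-accumulate loop by a two-phase decomposition
-- (aggregate everything into one dict, then partition it); objective: simpler.


-- ===== PORT A =====
def pvFoodGroups : List String :=
  ["MEAT", "FISH_MEAT", "EGG", "FRUIT", "VEGETABLE", "SWEETENER", "MONSTER", "DAIRY"]

def parse_recipe_ingredients (ingredients : List (String × Int)) :
    (List (String × Int)) × (List (String × Int)) :=
  let r := ingredients.foldl
    (fun (st : PySem.Dict String Int × PySem.Dict String Int) p =>
      let ingredient_key := PySem.Str.upper p.1
      if pvFoodGroups.contains ingredient_key then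
        if st.1.contains ingredient_key then
          (st.1.insert ingredient_key (st.1.getD ingredient_key 0 + p.2), st.2)
        else
          (st.1.insert ingredient_key p.2, st.2)
      else
        if st.2.contains ingredient_key then
          (st.1, st.2.insert ingredient_key (st.2.getD ingredient_key 0 + p.2))
        else
          (st.1, st.2.insert ingredient_key p.2))
    (PySem.Dict.empty, PySem.Dict.empty)
  (r.1.items, r.2.items)

-- ===== PORT B =====
def parse_recipe_ingredients_alt (ingredients : List (String × Int)) :
    (List (String × Int)) × (List (String × Int)) :=
  let totals := ingredients.foldl
    (fun (d : PySem.Dict String Int) p =>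
      let key := PySem.Str.upper p.1
      d.insert key (d.getD key 0 + p.2))
    PySem.Dict.empty
  (totals.items.filter (fun p => pvFoodGroups.contains p.1),
   totals.items.filter (fun p => !(pvFoodGroups.contains p.1)))

-- ===== PRECONDITION & SPEC =====
def Spec_parse_recipe_ingredients (ingredients : List (String × Int)) (out : (List (String × Int)) × (List (String × Int))) : Prop := out = parse_recipe_ingredients_alt ingredients
instance (ingredients : List (String × Int)) (out : (List (String × Int)) × (List (String × Int))) : Decidable (Spec_parse_recipe_ingredients ingredients out) := by unfold Spec_parse_recipe_ingredients; infer_instance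

-- ===== CLAIM (what is proved, stated in full; the proofs are below) =====
def Claim_equal_parse_recipe_ingredients : Prop := ∀ (ingredients : List (String × Int)), Dom_parse_recipe_ingredients ingredients → Spec_parse_recipe_ingredients ingredients (parse_recipe_ingredients ingredients)

-- ===== LEMMAS AND PROOFS =====

-- keep only the entries whose key satisfies pred
def pvFilt (pred : String → Bool) (d : PySem.Dict String Int) : PySem.Dict String Int :=
  PySem.Dict.mk (d.items.filter (fun p => pred p.1))

lemma pv_find_filter (pred : String → Bool) (k : String) (h : pred k = true)
    (l : List (String × Int)) :
    (l.filter (fun p => pred p.1)).find? (fun p => p.1 == k) = l.find? (fun p => p.1 == k) := by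
  induction l with
  | nil => rfl
  | cons p l ih =>
    by_cases hk : p.1 = k
    · simp [List.filter_cons, hk, h, List.find?_cons]
    · have hb : (p.1 == k) = false := by simp [hk]
      by_cases hp : pred p.1 = true
      · simp [List.filter_cons, hp, List.find?_cons, hb, ih]
      · simp only [Bool.not_eq_true] at hp
        simp [List.filter_cons, hp, List.find?_cons, hb, ih]

lemma pv_any_filter (pred : String → Bool) (k : String) (h : pred k = true)
    (l : List (String × Int)) :
    (l.filter (fun p => pred p.1)).any (fun p => p.1 == k) = l.any (fun p => p.1 == k) := by
  induction l with
  | nil => rfl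
  | cons p l ih =>
    by_cases hk : p.1 = k
    · simp [List.filter_cons, hk, h]
    · have hb : (p.1 == k) = false := by simp [hk]
      by_cases hp : pred p.1 = true
      · simp [List.filter_cons, hp, hb, ih]
      · simp only [Bool.not_eq_true] at hp
        simp [List.filter_cons, hp, hb, ih]

lemma pv_filter_map_repl_true (pred : String → Bool) (k : String) (v : Int)
    (h : pred k = true) (l : List (String × Int)) :
    (l.map (fun p => if p.1 == k then (k, v) else p)).filter (fun p => pred p.1)
      = (l.filter (fun p => pred p.1)).map (fun p => if p.1 == k then (k, v) else p) := by
  induction l with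
  | nil => rfl
  | cons p l ih =>
    simp only [List.map_cons, List.filter_cons, beq_iff_eq] at ih ⊢
    by_cases hk : p.1 = k
    · simp [hk, h, ih]
    · by_cases hp : pred p.1 = true
      · simp [hk, hp, ih]
      · simp only [Bool.not_eq_true] at hp
        simp [hk, hp, ih]

lemma pv_filter_map_repl_false (pred : String → Bool) (k : String) (v : Int)
    (h : pred k = false) (l : List (String × Int)) :
    (l.map (fun p => if p.1 == k then (k, v) else p)).filter (fun p => pred p.1)
      = l.filter (fun p => pred p.1) := by
  induction l with
  | nil => rfl
  | cons p l ih =>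
    simp only [List.map_cons, List.filter_cons, beq_iff_eq] at ih ⊢
    by_cases hk : p.1 = k
    · simp [hk, h, ih]
    · by_cases hp : pred p.1 = true
      · simp [hk, hp, ih]
      · simp only [Bool.not_eq_true] at hp
        simp [hk, hp, ih]

lemma pv_get?_filt (pred : String → Bool) (k : String) (h : pred k = true)
    (d : PySem.Dict String Int) :
    (pvFilt pred d).get? k = d.get? k := by
  simp [pvFilt, PySem.Dict.get?, pv_find_filter pred k h]

lemma pv_contains_filt (pred : String → Bool) (k : String) (h : pred k = true)
    (d : PySem.Dict String Int) :
    (pvFilt pred d).contains k = d.contains k := by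
  simp [pvFilt, PySem.Dict.contains, pv_any_filter pred k h]

lemma pv_insert_filt_comm (pred : String → Bool) (k : String) (v : Int)
    (h : pred k = true) (d : PySem.Dict String Int) :
    (pvFilt pred d).insert k v = pvFilt pred (d.insert k v) := by
  unfold PySem.Dict.insert
  rw [pv_contains_filt pred k h]
  by_cases hc : d.contains k = true
  · simp only [hc, if_true]
    exact (congrArg PySem.Dict.mk (pv_filter_map_repl_true pred k v h d.items)).symm
  · simp only [Bool.not_eq_true] at hc
    simp only [hc, Bool.false_eq_true, if_false]
    simp [pvFilt, List.filter_append, h]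

lemma pv_insert_filt_drop (pred : String → Bool) (k : String) (v : Int)
    (h : pred k = false) (d : PySem.Dict String Int) :
    pvFilt pred (d.insert k v) = pvFilt pred d := by
  unfold PySem.Dict.insert
  by_cases hc : d.contains k = true
  · simp only [hc, if_true]
    exact congrArg PySem.Dict.mk (pv_filter_map_repl_false pred k v h d.items)
  · simp only [Bool.not_eq_true] at hc
    simp only [hc, Bool.false_eq_true, if_false]
    simp [pvFilt, List.filter_append, h]

-- B's aggregation step and A's loop step
def pvStepT (d : PySem.Dict String Int) (p : String × Int) : PySem.Dict String Int :=
  d.insert (PySem.Str.upper p.1) (d.getD (PySem.Str.upper p.1) 0 + p.2)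

def pvStepA (st : PySem.Dict String Int × PySem.Dict String Int) (p : String × Int) :
    PySem.Dict String Int × PySem.Dict String Int :=
  let ingredient_key := PySem.Str.upper p.1
  if pvFoodGroups.contains ingredient_key then
    if st.1.contains ingredient_key then
      (st.1.insert ingredient_key (st.1.getD ingredient_key 0 + p.2), st.2)
    else
      (st.1.insert ingredient_key p.2, st.2)
  else
    if st.2.contains ingredient_key then
      (st.1, st.2.insert ingredient_key (st.2.getD ingredient_key 0 + p.2))
    else
      (st.1, st.2.insert ingredient_key p.2)

def pvP (k : String) : Bool := pvFoodGroups.contains k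
def pvQ (k : String) : Bool := !(pvFoodGroups.contains k)

lemma pv_getD_zero_of_not_contains (d : PySem.Dict String Int) (k : String)
    (h : d.contains k = false) : d.getD k 0 = 0 := by
  have hall : ∀ p ∈ d.items, ¬ ((fun (p : String × Int) => p.1 == k) p = true) := by
    intro p hp hb
    have hct : d.contains k = true := by
      unfold PySem.Dict.contains
      exact List.any_eq_true.mpr ⟨p, hp, hb⟩
    rw [h] at hct; exact Bool.false_ne_true hct
  unfold PySem.Dict.getD PySem.Dict.get?
  rw [List.find?_eq_none.mpr hall]
  rfl

lemma pv_step (d : PySem.Dict String Int) (p : String × Int) :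
    pvStepA (pvFilt pvP d, pvFilt pvQ d) p = (pvFilt pvP (pvStepT d p), pvFilt pvQ (pvStepT d p)) := by
  unfold pvStepA pvStepT
  set k := PySem.Str.upper p.1 with hk
  by_cases hm : pvFoodGroups.contains k = true
  · have hP : pvP k = true := hm
    have hQ : pvQ k = false := by simp only [pvQ, hm, Bool.not_true]
    simp only [hm, if_true]
    rw [pv_contains_filt pvP k hP]
    by_cases hc : d.contains k = true
    · have hgd : (pvFilt pvP d).getD k 0 = d.getD k 0 := by
        simp [PySem.Dict.getD, pv_get?_filt pvP k hP]
      simp only [hc, if_true, hgd]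
      rw [pv_insert_filt_comm pvP k _ hP, pv_insert_filt_drop pvQ k _ hQ]
    · simp only [Bool.not_eq_true] at hc
      simp only [hc, Bool.false_eq_true, if_false]
      have h0 : d.getD k 0 = 0 := pv_getD_zero_of_not_contains d k hc
      rw [h0, zero_add, pv_insert_filt_comm pvP k _ hP, pv_insert_filt_drop pvQ k _ hQ]
  · simp only [Bool.not_eq_true] at hm
    have hP : pvP k = false := hm
    have hQ : pvQ k = true := by simp only [pvQ, hm, Bool.not_false]
    simp only [hm, Bool.false_eq_true, if_false]
    rw [pv_contains_filt pvQ k hQ]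
    by_cases hc : d.contains k = true
    · have hgd : (pvFilt pvQ d).getD k 0 = d.getD k 0 := by
        simp [PySem.Dict.getD, pv_get?_filt pvQ k hQ]
      simp only [hc, if_true, hgd]
      rw [pv_insert_filt_comm pvQ k _ hQ, pv_insert_filt_drop pvP k _ hP]
    · simp only [Bool.not_eq_true] at hc
      simp only [hc, Bool.false_eq_true, if_false]
      have h0 : d.getD k 0 = 0 := pv_getD_zero_of_not_contains d k hc
      rw [h0, zero_add, pv_insert_filt_comm pvQ k _ hQ, pv_insert_filt_drop pvP k _ hP]

lemma pv_inv (l : List (String × Int)) : ∀ (d : PySem.Dict String Int),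
    l.foldl pvStepA (pvFilt pvP d, pvFilt pvQ d)
      = (pvFilt pvP (l.foldl pvStepT d), pvFilt pvQ (l.foldl pvStepT d)) := by
  induction l with
  | nil => intro d; rfl
  | cons p l ih =>
    intro d
    simp only [List.foldl_cons, pv_step d p]
    exact ih (pvStepT d p)

-- ===== VERDICT (by name: the statement is the Claim_ definition above) =====
theorem parse_recipe_ingredients_spec : Claim_equal_parse_recipe_ingredients := by
  intro ingredients _
  unfold Spec_parse_recipe_ingredients
  change ((List.foldl pvStepA (pvFilt pvP PySem.Dict.empty, pvFilt pvQ PySem.Dict.empty) ingredients).1.items,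
          (List.foldl pvStepA (pvFilt pvP PySem.Dict.empty, pvFilt pvQ PySem.Dict.empty) ingredients).2.items)
      = ((pvFilt pvP (List.foldl pvStepT PySem.Dict.empty ingredients)).items,
         (pvFilt pvQ (List.foldl pvStepT PySem.Dict.empty ingredients)).items)
  rw [pv_inv ingredients PySem.Dict.empty]
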